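-- pv_equiv track=rewrite | github.com/alf1001/Cipher_project | cipher/playfair_cipher.py | prepare_digraphs
-- ===== SOURCE A (Python) =====
-- def prepare_digraphs(text):
--     digraphs = []
--     i = 0
--     while i < len(text):
--         a = text[i]
--         b = text[i + 1] if i + 1 < len(text) else 'X'
--         if a == b:
--             digraphs.append(a + 'X')
--             i += 1
--         else:
--             digraphs.append(a + b)
--             i += 2
--     if len(digraphs[-1]) == 1:
--         digraphs[-1] += 'X'
--     return digraphs
-- ===== SOURCE B (Python) =====
-- def prepare_digraphs(text):
--     norm = []
--     for ch in text:
--         if len(norm) % 2 == 1 and norm[-1] == ch: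
--             norm.append('X')
--         norm.append(ch)
--     if len(norm) % 2 == 1:
--         norm.append('X')
--     digraphs = [norm[j] + norm[j + 1] for j in range(0, len(norm), 2)]
--     if len(digraphs[-1]) == 1:
--         digraphs[-1] += 'X'
--     return digraphs
-- ===== Notes on version B (the rewrite author's own statement) =====
-- stated objective: alternative
-- what changed: B replaces A's single variable-step pairing loop (advance by 1 or 2 depending on a doubled letter) with two differently-shaped passes: a one-character-at-a-time normalization pass that inserts 'X' between doubled letters at odd positions and pads to even length, followed by a fixed-stride chunking of the flat string into 2-char pairs.
import Mathlib
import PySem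

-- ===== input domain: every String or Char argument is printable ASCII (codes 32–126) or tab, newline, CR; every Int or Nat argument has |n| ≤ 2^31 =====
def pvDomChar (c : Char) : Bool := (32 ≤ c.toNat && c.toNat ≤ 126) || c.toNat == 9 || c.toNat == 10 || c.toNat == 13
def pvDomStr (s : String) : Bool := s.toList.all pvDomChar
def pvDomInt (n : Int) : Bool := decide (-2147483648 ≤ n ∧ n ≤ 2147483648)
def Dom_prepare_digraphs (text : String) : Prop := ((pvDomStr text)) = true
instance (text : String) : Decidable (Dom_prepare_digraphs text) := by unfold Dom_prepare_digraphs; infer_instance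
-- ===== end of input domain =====

-- B builds digraphs by a normalize-then-chunk decomposition instead of A's variable-step
-- pairing loop; same return value on all nonempty inputs (both raise IndexError on "").

-- ===== PORT A =====
-- A's while loop reads text[i] and text[i+1] (or pad 'X') and advances i by 1 or 2;
-- ported as recursion consuming the suffix of the character list from position i.
def pvALoop : List Char → List String
  | [] => []
  | a :: rest =>
    let b := match rest.head? with
      | some c => c
      | none => 'X'
    if a == b then String.ofList [a, 'X'] :: pvALoop rest
    else String.ofList [a, b] :: pvALoop rest.tail
termination_by cs => cs.length
decreasing_by
  all_goals simp [List.length_tail]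

-- final `if len(digraphs[-1]) == 1: digraphs[-1] += 'X'`; digraphs[-1] on the empty
-- list raises IndexError in Python (excluded by Pre_), here it yields [].
def pvAFix (d : List String) : List String :=
  match d.getLast? with
  | none => []
  | some s => if PySem.Str.len s = 1 then d.dropLast ++ [s ++ "X"] else d

def prepare_digraphs (text : String) : List String :=
  pvAFix (pvALoop text.toList)

-- ===== PORT B =====
-- the for-loop body: insert 'X' before a letter doubling the pending odd-position one
def pvBStep (norm : List Char) (ch : Char) : List Char :=
  if norm.length % 2 = 1 ∧ norm.getLast? = some ch then norm ++ ['X', ch]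
  else norm ++ [ch]

-- pad to even length
def pvBPad (norm : List Char) : List Char :=
  if norm.length % 2 = 1 then norm ++ ['X'] else norm

-- the comprehension [norm[j] + norm[j+1] for j in range(0, len(norm), 2)];
-- norm has even length after padding, so the singleton case is unreachable
def pvBChunk : List Char → List String
  | [] => []
  | [a] => [String.ofList [a]]
  | a :: b :: rest => String.ofList [a, b] :: pvBChunk rest

-- same final statement as A: digraphs[-1] raises IndexError on [] in Python
def pvBFix (d : List String) : List String :=
  match d.getLast? with
  | none => []
  | some s => if PySem.Str.len s = 1 then d.dropLast ++ [s ++ "X"] else d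

def prepare_digraphs_alt (text : String) : List String :=
  pvBFix (pvBChunk (pvBPad (text.toList.foldl pvBStep [])))

-- ===== PRECONDITION & SPEC =====
-- Pre_ excludes only the empty string, on which both Pythons raise IndexError at digraphs[-1].
def Pre_prepare_digraphs (text : String) : Prop := text ≠ ""
instance (text : String) : Decidable (Pre_prepare_digraphs text) := by unfold Pre_prepare_digraphs; infer_instance
def pvWitness_prepare_digraphs : String := "HELLO"

def Spec_prepare_digraphs (text : String) (out : List String) : Prop := out = prepare_digraphs_alt text
instance (text : String) (out : List String) : Decidable (Spec_prepare_digraphs text out) := by unfold Spec_prepare_digraphs; infer_instance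

-- ===== CLAIM (what is proved, stated in full; the proofs are below) =====
def Claim_equal_prepare_digraphs : Prop := ∀ (text : String), Dom_prepare_digraphs text → Pre_prepare_digraphs text → Spec_prepare_digraphs text (prepare_digraphs text)

-- ===== LEMMAS AND PROOFS =====

theorem pvBChunk_append_even : ∀ (xs ys : List Char), xs.length % 2 = 0 →
    pvBChunk (xs ++ ys) = pvBChunk xs ++ pvBChunk ys
  | [], _, _ => rfl
  | [_], _, h => by simp at h
  | a :: b :: rest, ys, h => by
      simp only [List.cons_append, pvBChunk, List.length_cons] at *
      rw [pvBChunk_append_even rest ys (by omega)]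

theorem pvStep_even (norm : List Char) (a : Char) (h : norm.length % 2 = 0) :
    pvBStep norm a = norm ++ [a] := by
  unfold pvBStep
  rw [if_neg]
  rintro ⟨h1, -⟩
  omega

theorem pvMain (n : Nat) : ∀ cs : List Char, cs.length ≤ n → ∀ norm : List Char,
    norm.length % 2 = 0 →
    pvBChunk (pvBPad (cs.foldl pvBStep norm)) = pvBChunk norm ++ pvALoop cs := by
  induction n with
  | zero =>
    intro cs hcs norm hn
    have : cs = [] := by cases cs <;> simp_all
    subst this
    simp [pvALoop, pvBPad, hn]
  | succ m ih =>
    intro cs hcs norm hn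
    match cs with
    | [] => simp [pvALoop, pvBPad, hn]
    | [a] =>
      -- one trailing character: B pads with 'X'; A pairs it with the pad 'X'
      simp only [List.foldl, pvStep_even norm a hn]
      have hodd : (norm ++ [a]).length % 2 = 1 := by simp; omega
      have hloop : pvALoop [a] = [String.ofList [a, 'X']] := by
        unfold pvALoop; simp [pvALoop]
      rw [pvBPad, if_pos hodd, List.append_assoc,
        pvBChunk_append_even norm ([a] ++ ['X']) hn, hloop]
      rfl
    | a :: b :: rest =>
      simp only [List.foldl, pvStep_even norm a hn]
      have hlast : (norm ++ [a]).getLast? = some a := by simp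
      by_cases hab : a = b
      · subst hab
        have h1 : pvBStep (norm ++ [a]) a = (norm ++ [a, 'X']) ++ [a] := by
          unfold pvBStep
          rw [if_pos ⟨by simp; omega, hlast⟩]
          simp
        have h2 : (norm ++ [a, 'X']).length % 2 = 0 := by simp; omega
        have key : List.foldl pvBStep (pvBStep (norm ++ [a]) a) rest
            = List.foldl pvBStep (norm ++ [a, 'X']) (a :: rest) := by
          simp only [List.foldl, pvStep_even _ a h2, h1]
        rw [key, ih (a :: rest) (by simp at hcs ⊢; omega) _ h2,
          pvBChunk_append_even norm [a, 'X'] hn]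
        have hloop : pvALoop (a :: a :: rest) = String.ofList [a, 'X'] :: pvALoop (a :: rest) := by
          conv_lhs => rw [pvALoop]
          simp
        rw [hloop]
        simp [pvBChunk]
      · have h1 : pvBStep (norm ++ [a]) b = norm ++ [a, b] := by
          unfold pvBStep
          rw [if_neg]
          · simp
          · rintro ⟨-, h2⟩
            rw [hlast] at h2
            exact hab (Option.some.inj h2)
        have h2 : (norm ++ [a, b]).length % 2 = 0 := by simp; omega
        rw [h1, ih rest (by simp at hcs ⊢; omega) _ h2,
          pvBChunk_append_even norm [a, b] hn]
        have hloop : pvALoop (a :: b :: rest) = String.ofList [a, b] :: pvALoop rest := by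
          conv_lhs => rw [pvALoop]
          simp [hab]
        rw [hloop]
        simp [pvBChunk]

-- ===== VERDICT (by name: the statement is the Claim_ definition above) =====
theorem prepare_digraphs_spec : Claim_equal_prepare_digraphs := by
  intro text _ _
  unfold Spec_prepare_digraphs prepare_digraphs prepare_digraphs_alt
  rw [pvMain text.toList.length text.toList le_rfl [] rfl]
  rfl
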